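-- pv_equiv track=rewrite | github.com/pypi-data/pypi-mirror-399 | packages/modelco/modelco-0.0.1.4.tar.gz/modelco-0.0.1.4/model_collaboration/data/eval.py | parse_model_response_mcq
-- ===== SOURCE A (Python) =====
-- def parse_model_response_mcq(response_text, options):
--     """
--     Parses a model's response to a multiple-choice question.
--     It attempts to identify the chosen option by letter (A, B, C...) or by matching
--     the text of the option.
--
--     Args:
--         response_text (str): The raw response string from the model.
--         options (list): The list of original options used in the question.
--
--     Returns:
--         tuple: A tuple containing (chosen_option_letter, chosen_option_text).
--                Returns (None, None) if no valid option is found.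
--     """
--     response_text_lower = response_text.lower().strip()
--
--     # Try to find an option letter (e.g., "A", "B", "C")
--     for i, option in enumerate(options):
--         option_letter = chr(65 + i) # A, B, C, ...
--         # Check for exact letter match or letter followed by punctuation/space
--         if response_text_lower == option_letter.lower() or \
--            response_text_lower.startswith(f"{option_letter.lower()})") or \
--            response_text_lower.startswith(f"{option_letter.lower()}.") or \
--            response_text_lower.startswith(f"{option_letter.lower()} "):
--             return option_letter, options[i]
--
--     # If no letter found, try to find a full option text match
--     # Iterate through options in reverse to prefer longer matches if partial overlap
--     # (though for exact matches, order doesn't strictly matter)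
--     for i, option in enumerate(options):
--         if option.lower() in response_text_lower:
--             return chr(65 + i), options[i]
--
--     # check for formats "A)", "(A)", "answer is A", "A."
--     for i, option in enumerate(options):
--         option_letter = chr(65 + i) # A, B, C, ...
--         if option_letter.lower() + ")" in response_text_lower or \
--            "(" + option_letter.lower() + ")" in response_text_lower or \
--            "answer is " + option_letter.lower() in response_text_lower or \
--            option_letter.lower() + "." in response_text_lower:
--             return option_letter, options[i]
--
--     return None, None # No valid option found
-- ===== SOURCE B (Python) =====
-- def parse_model_response_mcq(response_text, options):
--     """Single pass: score each option with its best matching phase (1 = letter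
--     prefix, 2 = option text contained, 3 = embedded letter format) and keep the
--     minimum (phase, index) key; returns (None, None) if nothing matches.
--     Since indices only grow, a later option can improve the running minimum only
--     with a strictly smaller phase, so phases >= the current best are pruned and
--     the loop stops once a phase-1 key is found."""
--     text = response_text.lower().strip()
--     best = None  # (phase, index, option)
--     for i, option in enumerate(options):
--         bound = best[0] if best is not None else 4  # only a phase < bound can win
--         if bound == 1:
--             break
--         letter = chr(65 + i).lower()
--         if (text == letter or text.startswith(letter + ")")
--                 or text.startswith(letter + ".") or text.startswith(letter + " ")):
--             best = (1, i, option)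
--         elif bound > 2 and option.lower() in text:
--             best = (2, i, option)
--         elif bound > 3 and (letter + ")" in text or "(" + letter + ")" in text
--                             or "answer is " + letter in text or letter + "." in text):
--             best = (3, i, option)
--     if best is None:
--         return None, None
--     return chr(65 + best[1]), best[2]
-- ===== Notes on version B (the rewrite author's own statement) =====
-- stated objective: alternative
-- what changed: Replaces A's three sequential early-return scans over the options with a single pass that assigns each option its best matching phase (1/2/3) and keeps the minimum (phase, index) key, making the priority order an explicit lexicographic argmin.
import Mathlib
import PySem

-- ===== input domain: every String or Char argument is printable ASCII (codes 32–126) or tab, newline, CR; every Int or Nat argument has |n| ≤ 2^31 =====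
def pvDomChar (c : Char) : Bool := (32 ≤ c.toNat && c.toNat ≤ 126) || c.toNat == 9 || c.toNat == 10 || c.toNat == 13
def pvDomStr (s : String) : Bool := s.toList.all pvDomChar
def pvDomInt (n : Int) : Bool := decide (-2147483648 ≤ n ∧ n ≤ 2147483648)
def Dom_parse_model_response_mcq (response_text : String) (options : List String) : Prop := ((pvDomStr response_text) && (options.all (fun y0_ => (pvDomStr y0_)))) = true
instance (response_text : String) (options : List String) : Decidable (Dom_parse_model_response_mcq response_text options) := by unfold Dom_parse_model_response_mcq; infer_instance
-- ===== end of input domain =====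

-- B replaces A's three sequential early-return scans with a single pass keeping the
-- minimum (phase, index) key; same cost, alternative decomposition (not claimed faster).

-- ===== PORT A =====
-- chr(65 + i)
def mcqLetter (i : Nat) : Char := Char.ofNat (65 + i)

-- c.lower() for a single character; exact for code points ≤ 0xFF (chr(65+i) with i ≤ 190):
-- ASCII A-Z and Latin-1 À-Þ (except ×) gain 32, everything else in that range is unchanged.
def mcqLowCh (c : Char) : Char :=
  if 65 ≤ c.toNat ∧ c.toNat ≤ 90 then Char.ofNat (c.toNat + 32)
  else if 192 ≤ c.toNat ∧ c.toNat ≤ 222 ∧ c.toNat ≠ 215 then Char.ofNat (c.toNat + 32)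
  else c

-- the phase-1 condition of both Pythons (t = lowered+stripped response, l = lowered letter)
def mcqCond1 (t : List Char) (l : Char) : Bool :=
  t == [l] || PySem.Chars.startswith t [l, ')'] ||
    PySem.Chars.startswith t [l, '.'] || PySem.Chars.startswith t [l, ' ']

-- the phase-2 condition: option.lower() in t
def mcqCond2 (t : List Char) (o : String) : Bool :=
  PySem.Chars.isIn (PySem.Chars.lower o.toList) t

-- the phase-3 condition
def mcqCond3 (t : List Char) (l : Char) : Bool :=
  PySem.Chars.isIn [l, ')'] t || PySem.Chars.isIn ['(', l, ')'] t ||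
    PySem.Chars.isIn ("answer is ".toList ++ [l]) t || PySem.Chars.isIn [l, '.'] t

-- A's first scan: letter-prefix match, early return
def mcqScan1 (t : List Char) (opts : List String) (i : Nat) : Option (String × String) :=
  match opts with
  | [] => none
  | o :: rest =>
      if mcqCond1 t (mcqLowCh (mcqLetter i)) then some (String.ofList [mcqLetter i], o)
      else mcqScan1 t rest (i + 1)

-- A's second scan: option text contained in the response
def mcqScan2 (t : List Char) (opts : List String) (i : Nat) : Option (String × String) :=
  match opts with
  | [] => none
  | o :: rest =>
      if mcqCond2 t o then some (String.ofList [mcqLetter i], o)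
      else mcqScan2 t rest (i + 1)

-- A's third scan: embedded letter formats
def mcqScan3 (t : List Char) (opts : List String) (i : Nat) : Option (String × String) :=
  match opts with
  | [] => none
  | o :: rest =>
      if mcqCond3 t (mcqLowCh (mcqLetter i)) then some (String.ofList [mcqLetter i], o)
      else mcqScan3 t rest (i + 1)

def parse_model_response_mcq (response_text : String) (options : List String) : Option String × Option String :=
  let t := PySem.Chars.strip (PySem.Chars.lower response_text.toList)
  match mcqScan1 t options 0 with
  | some (l, o) => (some l, some o)
  | none =>
    match mcqScan2 t options 0 with
    | some (l, o) => (some l, some o)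
    | none =>
      match mcqScan3 t options 0 with
      | some (l, o) => (some l, some o)
      | none => (none, none)

-- ===== PORT B =====
-- the single loop of B: keep the minimum (phase, index, option) key; only a phase
-- strictly below the current best one (bound) can win, and bound = 1 stops the loop
def mcqBest (t : List Char) (opts : List String) (i : Nat) (best : Option (Nat × Nat × String)) : Option (Nat × Nat × String) :=
  match opts with
  | [] => best
  | o :: rest =>
      let bound := match best with | none => 4 | some (bp, _, _) => bp
      if bound = 1 then best
      else
        let l := mcqLowCh (mcqLetter i)
        if mcqCond1 t l then mcqBest t rest (i + 1) (some (1, i, o))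
        else if 2 < bound ∧ mcqCond2 t o = true then mcqBest t rest (i + 1) (some (2, i, o))
        else if 3 < bound ∧ mcqCond3 t l = true then mcqBest t rest (i + 1) (some (3, i, o))
        else mcqBest t rest (i + 1) best

def parse_model_response_mcq_alt (response_text : String) (options : List String) : Option String × Option String :=
  let t := PySem.Chars.strip (PySem.Chars.lower response_text.toList)
  match mcqBest t options 0 none with
  | none => (none, none)
  | some (_, bi, bo) => (some (String.ofList [mcqLetter bi]), some bo)

-- ===== PRECONDITION & SPEC =====
def Spec_parse_model_response_mcq (response_text : String) (options : List String) (out : Option String × Option String) : Prop := out = parse_model_response_mcq_alt response_text options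
instance (response_text : String) (options : List String) (out : Option String × Option String) : Decidable (Spec_parse_model_response_mcq response_text options out) := by unfold Spec_parse_model_response_mcq; infer_instance

-- ===== CLAIM (what is proved, stated in full; the proofs are below) =====
def Claim_equal_parse_model_response_mcq : Prop := ∀ (response_text : String) (options : List String), Dom_parse_model_response_mcq response_text options → Spec_parse_model_response_mcq response_text options (parse_model_response_mcq response_text options)

-- ===== LEMMAS AND PROOFS =====

-- first (index, option) of the enumerated suffix satisfying f (proof-side spec function)
def mcqFirst (f : Nat → String → Bool) (opts : List String) (i : Nat) : Option (Nat × String) :=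
  match opts with
  | [] => none
  | o :: rest => if f i o then some (i, o) else mcqFirst f rest (i + 1)

theorem mcqScan1_eq (t : List Char) (opts : List String) (i : Nat) :
    mcqScan1 t opts i =
      (mcqFirst (fun j _ => mcqCond1 t (mcqLowCh (mcqLetter j))) opts i).map
        (fun x => (String.ofList [mcqLetter x.1], x.2)) := by
  induction opts generalizing i with
  | nil => rfl
  | cons o rest ih => simp only [mcqScan1, mcqFirst]; split <;> simp [ih]

theorem mcqScan2_eq (t : List Char) (opts : List String) (i : Nat) :
    mcqScan2 t opts i =
      (mcqFirst (fun _ o => mcqCond2 t o) opts i).map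
        (fun x => (String.ofList [mcqLetter x.1], x.2)) := by
  induction opts generalizing i with
  | nil => rfl
  | cons o rest ih => simp only [mcqScan2, mcqFirst]; split <;> simp [ih]

theorem mcqScan3_eq (t : List Char) (opts : List String) (i : Nat) :
    mcqScan3 t opts i =
      (mcqFirst (fun j _ => mcqCond3 t (mcqLowCh (mcqLetter j))) opts i).map
        (fun x => (String.ofList [mcqLetter x.1], x.2)) := by
  induction opts generalizing i with
  | nil => rfl
  | cons o rest ih => simp only [mcqScan3, mcqFirst]; split <;> simp [ih]

-- a phase-1 key stops the loop at once
theorem mcqBest_abs1 (t : List Char) (opts : List String) (i i' : Nat) (o : String) :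
    mcqBest t opts i' (some (1, i, o)) = some (1, i, o) := by
  cases opts <;> rfl

-- a phase-2 key survives until the first phase-1 hit (later phase-2/3 keys are pruned)
theorem mcqBest_abs2 (t : List Char) (opts : List String) (i i' : Nat) (o : String) :
    mcqBest t opts i' (some (2, i, o)) =
      match mcqFirst (fun j _ => mcqCond1 t (mcqLowCh (mcqLetter j))) opts i' with
      | some (j, o1) => some (1, j, o1)
      | none => some (2, i, o) := by
  induction opts generalizing i' with
  | nil => rfl
  | cons o2 rest ih =>
      by_cases h1 : mcqCond1 t (mcqLowCh (mcqLetter i')) = true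
      · simp only [mcqBest, mcqFirst, if_pos h1, if_neg (by omega : ¬(2 : Nat) = 1)]
        exact mcqBest_abs1 t rest i' (i' + 1) o2
      · simp only [mcqBest, mcqFirst, if_neg h1, if_neg (by omega : ¬(2 : Nat) = 1),
          if_neg (by omega : ¬((2:Nat) < 2 ∧ mcqCond2 t o2 = true)),
          if_neg (by omega : ¬((3:Nat) < 2 ∧ mcqCond3 t (mcqLowCh (mcqLetter i')) = true))]
        exact ih _

-- a phase-3 key survives until the first phase-1 or phase-2 hit
theorem mcqBest_abs3 (t : List Char) (opts : List String) (i i' : Nat) (o : String) :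
    mcqBest t opts i' (some (3, i, o)) =
      match mcqFirst (fun j _ => mcqCond1 t (mcqLowCh (mcqLetter j))) opts i' with
      | some (j, o1) => some (1, j, o1)
      | none =>
        match mcqFirst (fun _ o => mcqCond2 t o) opts i' with
        | some (j, o1) => some (2, j, o1)
        | none => some (3, i, o) := by
  induction opts generalizing i' with
  | nil => rfl
  | cons o2 rest ih =>
      by_cases h1 : mcqCond1 t (mcqLowCh (mcqLetter i')) = true
      · simp only [mcqBest, mcqFirst, if_pos h1, if_neg (by omega : ¬(3 : Nat) = 1)]
        exact mcqBest_abs1 t rest i' (i' + 1) o2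
      · by_cases h2 : mcqCond2 t o2 = true
        · simp only [mcqBest, mcqFirst, if_pos h2, if_neg h1, if_neg (by omega : ¬(3 : Nat) = 1),
            if_pos (⟨by omega, h2⟩ : (2:Nat) < 3 ∧ mcqCond2 t o2 = true)]
          exact mcqBest_abs2 t rest i' (i' + 1) o2
        · simp only [mcqBest, mcqFirst, if_neg h1, if_neg h2, if_neg (by omega : ¬(3 : Nat) = 1),
            if_neg (fun h : (2:Nat) < 3 ∧ mcqCond2 t o2 = true => h2 h.2), if_neg (by omega : ¬((3:Nat) < 3 ∧ mcqCond3 t (mcqLowCh (mcqLetter i')) = true))]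
          exact ih _

-- master lemma: B's pruned running minimum equals the three prioritized first hits
theorem mcqBest_eq (t : List Char) (opts : List String) (i : Nat) :
    mcqBest t opts i none =
      match mcqFirst (fun j _ => mcqCond1 t (mcqLowCh (mcqLetter j))) opts i with
      | some (j, o) => some (1, j, o)
      | none =>
        match mcqFirst (fun _ o => mcqCond2 t o) opts i with
        | some (j, o) => some (2, j, o)
        | none =>
          match mcqFirst (fun j _ => mcqCond3 t (mcqLowCh (mcqLetter j))) opts i with
          | some (j, o) => some (3, j, o)
          | none => none := by
  induction opts generalizing i with
  | nil => rfl
  | cons o rest ih =>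
      by_cases h1 : mcqCond1 t (mcqLowCh (mcqLetter i)) = true
      · simp only [mcqBest, mcqFirst, if_pos h1, if_neg (by omega : ¬(4 : Nat) = 1)]
        exact mcqBest_abs1 t rest i (i + 1) o
      · by_cases h2 : mcqCond2 t o = true
        · simp only [mcqBest, mcqFirst, if_pos h2, if_neg h1, if_neg (by omega : ¬(4 : Nat) = 1),
            if_pos (⟨by omega, h2⟩ : (2:Nat) < 4 ∧ mcqCond2 t o = true)]
          exact mcqBest_abs2 t rest i (i + 1) o
        · by_cases h3 : mcqCond3 t (mcqLowCh (mcqLetter i)) = true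
          · simp only [mcqBest, mcqFirst, if_pos h3, if_neg h1, if_neg h2,
              if_neg (by omega : ¬(4 : Nat) = 1), if_neg (fun h : (2:Nat) < 4 ∧ mcqCond2 t o = true => h2 h.2),
              if_pos (⟨by omega, h3⟩ : (3:Nat) < 4 ∧ mcqCond3 t (mcqLowCh (mcqLetter i)) = true)]
            exact mcqBest_abs3 t rest i (i + 1) o
          · simp only [mcqBest, mcqFirst, if_neg h1, if_neg h2, if_neg h3,
              if_neg (by omega : ¬(4 : Nat) = 1), if_neg (fun h : (2:Nat) < 4 ∧ mcqCond2 t o = true => h2 h.2), if_neg (fun h : (3:Nat) < 4 ∧ mcqCond3 t (mcqLowCh (mcqLetter i)) = true => h3 h.2)]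
            exact ih _

-- ===== VERDICT (by name: the statement is the Claim_ definition above) =====
theorem parse_model_response_mcq_spec : Claim_equal_parse_model_response_mcq := by
  intro response_text options _
  unfold Spec_parse_model_response_mcq parse_model_response_mcq parse_model_response_mcq_alt
  simp only [mcqBest_eq, mcqScan1_eq, mcqScan2_eq, mcqScan3_eq]
  generalize PySem.Chars.strip (PySem.Chars.lower response_text.toList) = t
  rcases h1 : mcqFirst (fun j _ => mcqCond1 t (mcqLowCh (mcqLetter j))) options 0 with _ | ⟨j, o⟩ <;>
    rcases h2 : mcqFirst (fun _ o => mcqCond2 t o) options 0 with _ | ⟨j2, o2⟩ <;>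
      rcases h3 : mcqFirst (fun j _ => mcqCond3 t (mcqLowCh (mcqLetter j))) options 0 with _ | ⟨j3, o3⟩ <;>
        simp
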